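-- pv_equiv track=rewrite | github.com/aprili1u/Fish-Network | network.py | id_edges
-- ===== SOURCE A (Python) =====
-- def id_edges(z):
--     ##return a dictionnaire associating to each edge the nodes concerned.
--
--     d={}
--     x=0
--     y=0
--     for i in range (1,int(z+1)):
--         if(x<y):
--
--             d[i]=(y,x)
--             x+=1
--
--         else:
--             y+=1
--             x=0
--             d[i]=(y,x)
--             x+=1
--     return(d)
-- ===== SOURCE B (Python) =====
-- def id_edges(z):
--     ##return a dictionnaire associating to each edge the nodes concerned.
--     n = int(z + 1)
--     m = n - 1
--     pairs = []
--     y = 1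
--     while len(pairs) < m:
--         pairs.extend((y, x) for x in range(y))
--         y += 1
--     return {i + 1: p for i, p in enumerate(pairs[:m])}
-- ===== Notes on version B (the rewrite author's own statement) =====
-- stated objective: alternative
-- what changed: Replaces the single stateful loop that threads (x,y) counters through each edge index by a row-wise construction: whole triangular rows [(y,0)..(y,y-1)] are generated and concatenated until m pairs exist, then sliced to m and zipped with keys 1..m.
import Mathlib
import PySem

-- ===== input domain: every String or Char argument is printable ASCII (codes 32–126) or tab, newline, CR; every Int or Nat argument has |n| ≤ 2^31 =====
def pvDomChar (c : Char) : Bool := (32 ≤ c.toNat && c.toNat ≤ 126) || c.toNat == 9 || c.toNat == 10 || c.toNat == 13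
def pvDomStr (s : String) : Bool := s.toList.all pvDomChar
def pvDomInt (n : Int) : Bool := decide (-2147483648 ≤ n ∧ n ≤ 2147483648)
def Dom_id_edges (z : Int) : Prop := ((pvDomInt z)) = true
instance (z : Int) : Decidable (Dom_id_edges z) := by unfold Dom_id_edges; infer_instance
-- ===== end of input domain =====

-- B is an alternative construction: it builds whole triangular rows and zips them with keys,
-- instead of A's single loop threading the (x, y) counters through every edge index.

-- ===== PORT A =====
-- step of A's for-loop body: state is (dict, x, y)
def idEdgesStepA (s : PySem.Dict Int (Int × Int) × Int × Int) (i : Int) :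
    PySem.Dict Int (Int × Int) × Int × Int :=
  let d := s.1; let x := s.2.1; let y := s.2.2
  if x < y then (d.insert i (y, x), x + 1, y)
  else (d.insert i (y + 1, 0), 1, y + 1)

def id_edges (z : Int) : List (Int × Int × Int) :=
  ((PySem.List.pyRange 1 (z + 1) 1).foldl idEdgesStepA (PySem.Dict.empty, 0, 0)).1.items

-- ===== PORT B =====
-- the while-loop of B: extend `acc` by row y while it has fewer than m pairs
-- (fuel bounds the iteration count; m iterations always suffice since every row is nonempty)
def idEdgesRowsB (m : Int) : Int → List (Int × Int) → Nat → List (Int × Int)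
  | _, acc, 0 => acc
  | y, acc, Nat.succ fuel =>
      if (acc.length : Int) < m then
        idEdgesRowsB m (y + 1) (acc ++ (PySem.List.pyRange 0 y 1).map (fun x => (y, x))) fuel
      else acc

def id_edges_alt (z : Int) : List (Int × Int × Int) :=
  let n := z + 1
  let m := n - 1
  let pairs := idEdgesRowsB m 1 [] m.toNat
  let sliced := PySem.List.slice pairs none (some m)
  ((PySem.List.enumerate sliced 0).foldl
      (fun (d : PySem.Dict Int (Int × Int)) p => d.insert (p.1 + 1) p.2)
      PySem.Dict.empty).items

-- ===== PRECONDITION & SPEC =====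
def Spec_id_edges (z : Int) (out : List (Int × Int × Int)) : Prop := out = id_edges_alt z
instance (z : Int) (out : List (Int × Int × Int)) : Decidable (Spec_id_edges z out) := by unfold Spec_id_edges; infer_instance

-- ===== CLAIM (what is proved, stated in full; the proofs are below) =====
def Claim_equal_id_edges : Prop := ∀ (z : Int), Dom_id_edges z → Spec_id_edges z (id_edges z)

-- ===== LEMMAS AND PROOFS =====

lemma items_empty_eq : (PySem.Dict.empty : PySem.Dict Int (Int × Int)).items = [] := rfl

-- the common pair stream: g k x y = the next k pairs emitted from counter state (x, y)
def gPairs : Nat → Int → Int → List (Int × Int)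
  | 0, _, _ => []
  | k + 1, x, y => if x < y then (y, x) :: gPairs k (x + 1) y else (y + 1, 0) :: gPairs k 1 (y + 1)

lemma gPairs_take (a : Nat) : ∀ (b : Nat) (x y : Int), a ≤ b → gPairs a x y = (gPairs b x y).take a := by
  induction a with
  | zero => intro b x y _; simp [gPairs]
  | succ a ih =>
      intro b x y hab
      obtain ⟨b', rfl⟩ : ∃ b', b = b' + 1 := ⟨b - 1, by omega⟩
      simp only [gPairs]
      split <;> simp [ih _ _ _ (by omega : a ≤ b')]

lemma gPairs_state_eq (k : Nat) (y : Int) (hy : 0 ≤ y) : gPairs k y y = gPairs k 0 (y + 1) := by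
  cases k with
  | zero => rfl
  | succ k => simp only [gPairs]; rw [if_neg (by omega), if_pos (by omega)]; norm_num

lemma gPairs_row : ∀ (c : Nat) (x y : Int) (k : Nat), 0 ≤ x → x + (c : Int) = y →
    gPairs (c + k) x y = (PySem.List.pyRange x y 1).map (fun t => (y, t)) ++ gPairs k 0 (y + 1) := by
  intro c
  induction c with
  | zero =>
      intro x y k hx hxy
      have : x = y := by omega
      subst this
      rw [PySem.List.pyRange_one_eq_nil (le_refl x)]
      simpa using gPairs_state_eq k x hx
  | succ c ih =>
      intro x y k hx hxy
      have hxy' : x < y := by omega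
      rw [PySem.List.pyRange_one_cons hxy']
      have : c + 1 + k = (c + k) + 1 := by omega
      rw [this]
      simp only [gPairs, if_pos hxy', List.map_cons, List.cons_append]
      rw [ih (x + 1) y k (by omega) (by omega)]

lemma gPairs_zero_one (k : Nat) : gPairs k 0 0 = gPairs k 0 1 := by
  cases k with
  | zero => rfl
  | succ k => simp only [gPairs]; norm_num

lemma enumerate_shift {α : Type} (P : List α) : ∀ (s : Int),
    (PySem.List.enumerate P s).map (fun a => (a.1 + 1, a.2)) = PySem.List.enumerate P (s + 1) := by
  induction P with
  | nil => intro s; simp [PySem.List.enumerate_nil]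
  | cons p P ih => intro s; simp [PySem.List.enumerate_cons, ih]

-- A's fold over range(i0, i0+k) appends exactly the next k stream pairs, keyed i0, i0+1, …
lemma foldA_items : ∀ (k : Nat) (i0 x y : Int) (d : PySem.Dict Int (Int × Int)),
    (∀ j ∈ d.keys, j < i0) →
    ((PySem.List.pyRange i0 (i0 + (k : Int)) 1).foldl idEdgesStepA (d, x, y)).1.items
      = d.items ++ PySem.List.enumerate (gPairs k x y) i0 := by
  intro k
  induction k with
  | zero =>
      intro i0 x y d _
      simp [gPairs,
        PySem.List.enumerate_nil]
  | succ k ih =>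
      intro i0 x y d hd
      have hlt : i0 < i0 + ((k : Int) + 1) := by omega
      rw [show ((k + 1 : Nat) : Int) = (k : Int) + 1 by push_cast; ring,
        PySem.List.pyRange_one_cons hlt, List.foldl_cons]
      have hfresh : d.contains i0 = false := by
        rw [PySem.Dict.contains_eq_decide_mem_keys]
        simp only [decide_eq_false_iff_not]
        intro h
        have := hd i0 h
        omega
      have harr : i0 + ((k : Int) + 1) = (i0 + 1) + (k : Int) := by ring
      simp only [idEdgesStepA]
      split
      · rename_i hxy
        rw [harr, ih (i0 + 1) (x + 1) y (d.insert i0 (y, x))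
            (by intro j hj
                rcases (PySem.Dict.mem_keys_insert _ _ _ _).mp hj with h | h
                · omega
                · have := hd j h; omega)]
        rw [PySem.Dict.items_insert_of_not_contains _ _ hfresh]
        simp only [gPairs, if_pos hxy, PySem.List.enumerate_cons, List.append_assoc,
          List.singleton_append]
      · rename_i hxy
        rw [harr, ih (i0 + 1) 1 (y + 1) (d.insert i0 (y + 1, 0))
            (by intro j hj
                rcases (PySem.Dict.mem_keys_insert _ _ _ _).mp hj with h | h
                · omega
                · have := hd j h; omega)]
        rw [PySem.Dict.items_insert_of_not_contains _ _ hfresh]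
        simp only [gPairs, if_neg hxy, PySem.List.enumerate_cons, List.append_assoc,
          List.singleton_append]

-- B's while-loop: if acc is a stream prefix continuing at row y, the result is a stream
-- prefix too, and (given enough fuel) at least m long
lemma rowsB_spec : ∀ (fuel : Nat) (y : Int) (acc : List (Int × Int)) (m : Int),
    1 ≤ y →
    (∀ K : Nat, gPairs (acc.length + K) 0 1 = acc ++ gPairs K 0 y) →
    (idEdgesRowsB m y acc fuel = gPairs (idEdgesRowsB m y acc fuel).length 0 1) ∧
      (m ≤ (acc.length : Int) + (fuel : Int) → m ≤ ((idEdgesRowsB m y acc fuel).length : Int)) := by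
  intro fuel
  induction fuel with
  | zero =>
      intro y acc m _ H
      refine ⟨?_, by simpa using fun h => h⟩
      have := H 0
      simpa [gPairs] using this.symm
  | succ fuel ih =>
      intro y acc m hy H
      simp only [idEdgesRowsB]
      split
      · rename_i hlen
        have hrowlen : ((PySem.List.pyRange 0 y 1).map (fun x => (y, x))).length = y.toNat := by
          simp [PySem.List.length_pyRange_one]
        have H' : ∀ K : Nat,
            gPairs ((acc ++ (PySem.List.pyRange 0 y 1).map (fun x => (y, x))).length + K) 0 1
              = (acc ++ (PySem.List.pyRange 0 y 1).map (fun x => (y, x))) ++ gPairs K 0 (y + 1) := by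
          intro K
          have h1 := H (y.toNat + K)
          have h2 : gPairs (y.toNat + K) 0 y
              = (PySem.List.pyRange 0 y 1).map (fun t => (y, t)) ++ gPairs K 0 (y + 1) :=
            gPairs_row y.toNat 0 y K (le_refl 0) (by omega)
          rw [List.length_append, hrowlen]
          rw [show acc.length + y.toNat + K = acc.length + (y.toNat + K) by omega, h1, h2]
          simp
        have := ih (y + 1) (acc ++ (PySem.List.pyRange 0 y 1).map (fun x => (y, x))) m
          (by omega) H'
        refine ⟨this.1, fun hm => this.2 ?_⟩
        rw [List.length_append, hrowlen]
        push_cast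
        omega
      · rename_i hlen
        refine ⟨?_, fun _ => by omega⟩
        have := H 0
        simpa [gPairs] using this.symm

lemma idEdges_alt_eq (z : Int) (hz : 0 ≤ z) :
    id_edges_alt z = PySem.List.enumerate (gPairs z.toNat 0 0) 1 := by
  have H0 : ∀ K : Nat, gPairs (([] : List (Int × Int)).length + K) 0 1 = [] ++ gPairs K 0 1 := by
    intro K; simp
  obtain ⟨hpref, hlen⟩ := rowsB_spec z.toNat 1 [] z (le_refl 1) H0
  have hlen' : z ≤ ((idEdgesRowsB z 1 [] z.toNat).length : Int) := by
    apply hlen; simp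
  unfold id_edges_alt
  simp only []
  have hm : z + 1 - 1 = z := by ring
  rw [hm]
  set P := idEdgesRowsB z 1 [] z.toNat with hP
  have hslice : PySem.List.slice P none (some z) = P.take z.toNat :=
    PySem.List.slice_to P hz
  rw [hslice]
  have htake : P.take z.toNat = gPairs z.toNat 0 1 := by
    conv_lhs => rw [hpref]
    exact (gPairs_take z.toNat P.length 0 1 (by omega)).symm
  rw [htake, ← gPairs_zero_one]
  -- the dict comprehension over enumerate: fresh, strictly increasing keys append in order
  set L := PySem.List.enumerate (gPairs z.toNat 0 0) 0 with hL
  have hnodup : (L.map (fun a => a.1 + 1)).Nodup := by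
    have : L.map (fun (a : Int × Int × Int) => a.1 + 1)
        = (L.map (·.1)).map (fun t => t + 1) := by simp
    rw [this, hL, PySem.List.map_fst_enumerate]
    exact (PySem.List.nodup_pyRange_one _ _).map (fun a b h => by omega)
  have hfresh : ∀ a ∈ L, (PySem.Dict.empty : PySem.Dict Int (Int × Int)).contains (a.1 + 1) = false := by
    intro a _; simp [PySem.Dict.contains_empty]
  rw [PySem.Dict.items_foldl_insert_fresh L (fun a => a.1 + 1) (fun a => a.2) _ hfresh hnodup]
  have : L.map (fun a => (a.1 + 1, a.2)) = PySem.List.enumerate (gPairs z.toNat 0 0) 1 := by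
    rw [hL]
    simpa using enumerate_shift (gPairs z.toNat 0 0) 0
  simp [this, items_empty_eq]

-- ===== VERDICT (by name: the statement is the Claim_ definition above) =====
theorem id_edges_spec : Claim_equal_id_edges := by
  intro z _
  unfold Spec_id_edges
  by_cases hz : 0 ≤ z
  · have hA : id_edges z = PySem.List.enumerate (gPairs z.toNat 0 0) 1 := by
      unfold id_edges
      have h1 : z + 1 = 1 + (z.toNat : Int) := by omega
      rw [h1, foldA_items z.toNat 1 0 0 PySem.Dict.empty (by simp [PySem.Dict.keys_empty])]
      simp [items_empty_eq]
    rw [hA, idEdges_alt_eq z hz]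
  · -- z < 0: both sides are empty
    have hA : id_edges z = [] := by
      unfold id_edges
      rw [PySem.List.pyRange_one_eq_nil (by omega : z + 1 ≤ 1)]
      simp [items_empty_eq]
    have hB : id_edges_alt z = [] := by
      unfold id_edges_alt
      simp only []
      have hm : (z + 1 - 1).toNat = 0 := by omega
      rw [show z + 1 - 1 = z by ring] at *
      have : idEdgesRowsB z 1 [] z.toNat = [] := by
        rw [show z.toNat = 0 by omega]; rfl
      rw [this]
      simp [PySem.List.slice, PySem.List.enumerate_nil, items_empty_eq]
    rw [hA, hB]
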